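-- pv_equiv track=rewrite | github.com/TwinkleRing/Today-I-Learned | 카카오 코딩테스트 기출/Level 2/괄호 변환.py | solution
-- ===== SOURCE A (Python) =====
-- def solution(p):
--     answer = ''
--     if p == ''  : # 1.
--         return ''
--
--     u, v = p[ : divide(p)+1], p[divide(p)+1 : ] # 2.
--
--     if check(u) : # 3. u가 "올바른 괄호 문자열" 이면?
--         # v를 1단계부터 수행
--         string = solution(v)
--         return u + string
--
--     else : # 4. 문자열 u가 "올바른 괄호 문자열" 이 아니라면?
--         tmp = '(' # 4-1
--         tmp += solution(v)
--         tmp += ')'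
--         u = list(u[1 : -1])
--         for i in range(len(u)) :
--             if u[i] == '(' :
--                 u[i] = ')'
--             elif u[i] == ')' :
--                 u[i] = '('
--         tmp += ''.join(u)
--
--     return tmp
--
-- def divide(w) : # 두 "균형잡힌 괄호 문자열" u, v로 분리
--         num = 0
--         temp = []
--         for idx , value in enumerate(w) :
--             if value == ')' :
--                 num -= 1
--             if value == '(' :
--                 num += 1
--             if num == 0 :
--                 return idx
--
-- def check(ss) : # 올바른 괄호인지 체크
--         stack = []
--         for s in ss :
--             if s == '('  :
--                 stack.append(s)
--             elif s == ')' and stack :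
--                 if stack[-1] == '(' :
--                     stack.pop()
--                 else :
--                     stack.append(s)
--             else :
--                 stack.append(s)
--
--         if stack :
--             return False
--         else :
--             return True
-- ===== SOURCE B (Python) =====
-- def solution(p):
--     # One pass: cut p into all top-level components (depth returns to 0),
--     # then fold them right-to-left with a string accumulator.
--     comps = []
--     cur = []
--     depth = 0
--     for ch in p:
--         cur.append(ch)
--         if ch == '(':
--             depth += 1
--         elif ch == ')':
--             depth -= 1
--         if depth == 0:
--             comps.append(''.join(cur))
--             cur = []
--     acc = ''
--     for c in reversed(comps):
--         if is_correct(c):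
--             acc = c + acc
--         else:
--             acc = '(' + acc + ')' + flip(c[1:-1])
--     return acc
--
-- def is_correct(s):
--     bal = 0
--     for ch in s:
--         if ch == '(':
--             bal += 1
--         elif ch == ')':
--             if bal == 0:
--                 return False
--             bal -= 1
--         else:
--             return False
--     return bal == 0
--
-- def flip(s):
--     return ''.join(')' if ch == '(' else ('(' if ch == ')' else ch) for ch in s)
-- ===== Notes on version B (the rewrite author's own statement) =====
-- stated objective: alternative
-- what changed: B replaces A's recursive re-splitting (divide scanned twice per level, fresh slices per recursive call, a stack-based correctness check, an index loop for flipping) by a single left-to-right pass that cuts p into all top-level components at once, followed by a right-to-left fold over that component list with a counter-based correctness check and a comprehension flip.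
import Mathlib
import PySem

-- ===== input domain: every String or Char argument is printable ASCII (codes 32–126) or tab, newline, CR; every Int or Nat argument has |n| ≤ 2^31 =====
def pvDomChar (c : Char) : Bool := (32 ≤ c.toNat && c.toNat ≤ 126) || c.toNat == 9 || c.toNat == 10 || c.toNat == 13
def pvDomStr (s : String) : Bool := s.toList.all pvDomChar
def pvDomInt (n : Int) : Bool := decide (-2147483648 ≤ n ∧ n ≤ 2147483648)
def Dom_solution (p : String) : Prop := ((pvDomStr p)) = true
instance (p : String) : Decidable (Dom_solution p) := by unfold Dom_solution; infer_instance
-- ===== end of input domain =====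

-- B replaces A's recursive re-splitting by one pass cutting all top-level components, then a
-- right-to-left fold with a counter-based correctness check (objective: alternative decomposition).

-- ===== PORT A =====
-- divide(w): enumerate loop keeping num; returns the first idx at which num == 0 (None if never).
def divideGo (num : Int) (idx : Nat) : List Char → Option Nat
  | [] => none
  | c :: rest =>
    let num1 := if c = ')' then num - 1 else num
    let num2 := if c = '(' then num1 + 1 else num1
    if num2 = 0 then some idx else divideGo num2 (idx + 1) rest

-- check(ss): explicit stack, head of the list is the Python stack's top (stack[-1]).
def checkStep (stack : List Char) (s : Char) : List Char :=
  if s = '(' then s :: stack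
  else if s = ')' ∧ stack ≠ [] then
    match stack with
    | t :: ts => if t = '(' then ts else s :: stack
    | [] => s :: stack
  else s :: stack

def checkA (ss : List Char) : Bool :=
  (ss.foldl checkStep []).isEmpty

-- the index loop flipping u[i] between '(' and ')'
def flipGo : List Char → List Char
  | [] => []
  | c :: rest => (if c = '(' then ')' else if c = ')' then '(' else c) :: flipGo rest

-- solution(p): slices p[:d+1] / p[d+1:] are take/drop (d+1 ≥ 0 in range); u[1:-1] is (drop 1).dropLast,
-- exact for every length.  When divide(p) is None the Python raises TypeError (None+1): that input is
-- excluded by Pre_solution; the port returns [] there.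
def solutionA (cs : List Char) : List Char :=
  if cs = [] then []
  else
    match divideGo 0 0 cs with
    | none => []  -- Python: TypeError (excluded by Pre_solution)
    | some d =>
      let u := cs.take (d + 1)
      let v := cs.drop (d + 1)
      if checkA u then u ++ solutionA v
      else '(' :: solutionA v ++ ')' :: flipGo ((u.drop 1).dropLast)
termination_by cs.length
decreasing_by
  all_goals cases cs <;> simp_all <;> omega

def solution (p : String) : String := String.mk (solutionA p.toList)

-- ===== PORT B =====
-- one pass: cut p into all top-level components (cur buffer, depth counter)
def compGo (comps : List (List Char)) (cur : List Char) (depth : Int) : List Char → List (List Char)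
  | [] => comps
  | c :: rest =>
    let cur' := cur ++ [c]
    let depth' := if c = '(' then depth + 1 else if c = ')' then depth - 1 else depth
    if depth' = 0 then compGo (comps ++ [cur']) [] 0 rest
    else compGo comps cur' depth' rest

-- is_correct(s): balance counter, early False on a non-bracket or an unmatched ')'
def isCorrectGo (bal : Int) : List Char → Bool
  | [] => bal = 0
  | c :: rest =>
    if c = '(' then isCorrectGo (bal + 1) rest
    else if c = ')' then (if bal = 0 then false else isCorrectGo (bal - 1) rest)
    else false

def isCorrect (s : List Char) : Bool := isCorrectGo 0 s

-- flip(s): a comprehension = map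
def flipB (s : List Char) : List Char :=
  s.map (fun ch => if ch = '(' then ')' else if ch = ')' then '(' else ch)

-- the right-to-left fold over the component list
def accStep (acc : List Char) (c : List Char) : List Char :=
  if isCorrect c then c ++ acc
  else '(' :: acc ++ ')' :: flipB ((c.drop 1).dropLast)

def solution_alt (p : String) : String :=
  String.mk (((compGo [] [] 0 p.toList).reverse).foldl accStep [])

-- ===== PRECONDITION & SPEC =====
-- Pre_: exactly the inputs on which A returns: as many '(' as ')' — otherwise divide eventually
-- returns None and A raises TypeError on None+1.
def Pre_solution (p : String) : Prop := p.toList.count '(' = p.toList.count ')'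
instance (p : String) : Decidable (Pre_solution p) := by unfold Pre_solution; infer_instance

def pvWitness_solution : String := "()(ab)"

def Spec_solution (p : String) (out : String) : Prop := out = solution_alt p
instance (p : String) (out : String) : Decidable (Spec_solution p out) := by unfold Spec_solution; infer_instance

-- ===== CLAIM (what is proved, stated in full; the proofs are below) =====
def Claim_equal_solution : Prop := ∀ (p : String), Dom_solution p → Pre_solution p → Spec_solution p (solution p)

-- ===== LEMMAS AND PROOFS =====

-- character weight for the running bracket count
def chval (c : Char) : Int := if c = '(' then 1 else if c = ')' then -1 else 0

def del (cs : List Char) : Int := (cs.map chval).sum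

theorem del_nil : del [] = 0 := rfl

theorem del_cons (c : Char) (cs : List Char) : del (c :: cs) = chval c + del cs := by
  simp [del]

theorem del_append (a b : List Char) : del (a ++ b) = del a + del b := by
  simp [del]

theorem num_step (num : Int) (c : Char) :
    (if c = '(' then (if c = ')' then num - 1 else num) + 1 else (if c = ')' then num - 1 else num))
      = num + chval c := by
  by_cases h1 : c = '(' <;> by_cases h2 : c = ')' <;> simp_all [chval] <;> ring

-- divideGo with index idx = divideGo with index 0, shifted
theorem divideGo_shift (cs : List Char) : ∀ (num : Int) (idx : Nat),
    divideGo num idx cs = (divideGo num 0 cs).map (fun j => idx + j) := by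
  induction cs with
  | nil => intro num idx; simp [divideGo]
  | cons c rest ih =>
    intro num idx
    simp only [divideGo]
    by_cases h : (if c = '(' then (if c = ')' then num - 1 else num) + 1 else (if c = ')' then num - 1 else num)) = 0
    · simp [h]
    · simp only [h, if_neg h, Option.map]
      rw [ih _ (idx + 1), ih _ 1]
      cases divideGo _ 0 rest <;> simp <;> omega

-- the prefix cut off by divide has running count reaching exactly -num
theorem divideGo_del (cs : List Char) : ∀ (num : Int) (d : Nat),
    divideGo num 0 cs = some d → num + del (cs.take (d + 1)) = 0 := by
  induction cs with
  | nil => intro num d h; simp [divideGo] at h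
  | cons c rest ih =>
    intro num d h
    simp only [divideGo] at h
    rw [num_step] at h
    by_cases h0 : num + chval c = 0
    · simp [h0] at h
      subst h
      simp [List.take_succ_cons, del_cons, del_nil]
      omega
    · rw [if_neg h0, divideGo_shift] at h
      cases hr : divideGo (num + chval c) 0 rest with
      | none => simp [hr] at h
      | some j =>
        simp [hr] at h
        have hih := ih _ _ hr
        subst h
        have hshape : (c :: rest).take (1 + j + 1) = c :: rest.take (j + 1) := by
          rw [show 1 + j + 1 = (j + 1) + 1 by omega, List.take_succ_cons]
        rw [hshape, del_cons]
        omega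

-- divide succeeds whenever the total count cancels num and the list is nonempty
theorem divideGo_total (cs : List Char) : ∀ (num : Int), cs ≠ [] → num + del cs = 0 →
    ∃ d, divideGo num 0 cs = some d := by
  induction cs with
  | nil => intro num h; exact absurd rfl h
  | cons c rest ih =>
    intro num _ hsum
    simp only [divideGo]
    rw [num_step]
    by_cases h0 : num + chval c = 0
    · exact ⟨0, by simp [h0]⟩
    · have hrest : rest ≠ [] := by
        rintro rfl
        rw [del_cons, del_nil] at hsum
        omega
      have hsum' : (num + chval c) + del rest = 0 := by rw [del_cons] at hsum; omega
      obtain ⟨j, hj⟩ := ih _ hrest hsum'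
      refine ⟨1 + j, ?_⟩
      rw [if_neg h0, divideGo_shift, hj]
      rfl

-- ===== checkA (stack) = isCorrect (counter) =====

-- a stack whose bottom part starts with a non-'(' never empties again
theorem checkA_stuck (cs : List Char) : ∀ (k : Nat) (j : List Char) (c0 : Char) (t : List Char),
    j = c0 :: t → c0 ≠ '(' → cs.foldl checkStep (List.replicate k '(' ++ j) ≠ [] := by
  induction cs with
  | nil =>
    intro k j c0 t hj hc
    subst hj
    cases k <;> simp
  | cons c rest ih =>
    intro k j c0 t hj hc
    simp only [List.foldl_cons]
    by_cases h1 : c = '('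
    · subst h1
      have : checkStep (List.replicate k '(' ++ j) '(' = List.replicate (k + 1) '(' ++ j := by
        simp [checkStep, List.replicate_succ]
      rw [this]; exact ih (k + 1) j c0 t hj hc
    · by_cases h2 : c = ')'
      · subst h2
        cases k with
        | zero =>
          have hne : (List.replicate 0 '(' ++ j) ≠ [] := by subst hj; simp
          have : checkStep (List.replicate 0 '(' ++ j) ')' = List.replicate 0 '(' ++ (')' :: j) := by
            subst hj
            simp [checkStep, hc]
          rw [this]; exact ih 0 _ ')' j rfl (by decide)
        | succ k' =>
          have : checkStep (List.replicate (k' + 1) '(' ++ j) ')' = List.replicate k' '(' ++ j := by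
            simp [checkStep, List.replicate_succ]
          rw [this]; exact ih k' j c0 t hj hc
      · have : checkStep (List.replicate k '(' ++ j) c = List.replicate 0 '(' ++ (c :: (List.replicate k '(' ++ j)) := by
          simp [checkStep, h1, h2]
        rw [this]; exact ih 0 _ c _ rfl h1

-- on a clean stack of k opens, the stack run tracks the counter run exactly
theorem checkA_counter (cs : List Char) : ∀ (k : Nat),
    (isCorrectGo (k : Int) cs = true → cs.foldl checkStep (List.replicate k '(') = [])
    ∧ (isCorrectGo (k : Int) cs = false → cs.foldl checkStep (List.replicate k '(') ≠ []) := by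
  induction cs with
  | nil =>
    intro k
    constructor
    · intro h
      simp [isCorrectGo] at h
      have : k = 0 := by exact_mod_cast h
      simp [this]
    · intro h
      simp [isCorrectGo] at h
      have : k ≠ 0 := by
        intro h0; subst h0; simp at h
      cases k with
      | zero => exact absurd rfl this
      | succ n => simp
  | cons c rest ih =>
    intro k
    by_cases h1 : c = '('
    · subst h1
      have hstep : checkStep (List.replicate k '(') '(' = List.replicate (k + 1) '(' := by
        simp [checkStep, List.replicate_succ]
      have hic : isCorrectGo (k : Int) ('(' :: rest) = isCorrectGo ((k + 1 : Nat) : Int) rest := by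
        simp [isCorrectGo]
      constructor
      · intro h
        rw [hic] at h
        simp only [List.foldl_cons, hstep]
        exact (ih (k + 1)).1 h
      · intro h
        rw [hic] at h
        simp only [List.foldl_cons, hstep]
        exact (ih (k + 1)).2 h
    · by_cases h2 : c = ')'
      · subst h2
        cases k with
        | zero =>
          have hstep : checkStep (List.replicate 0 '(') ')' = [')'] := by
            simp [checkStep]
          constructor
          · intro h
            have hf : isCorrectGo (0 : Int) (')' :: rest) = false := rfl
            simp only [Nat.cast_zero] at h
            simp [hf] at h
          · intro _
            simp only [List.foldl_cons, hstep]
            exact checkA_stuck rest 0 [')'] ')' [] rfl (by decide)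
        | succ n =>
          have hstep : checkStep (List.replicate (n + 1) '(') ')' = List.replicate n '(' := by
            simp [checkStep, List.replicate_succ]
          have hic : isCorrectGo ((n + 1 : Nat) : Int) (')' :: rest) = isCorrectGo ((n : Nat) : Int) rest := by
            have hne : ((n + 1 : Nat) : Int) ≠ 0 := by exact_mod_cast Nat.succ_ne_zero n
            have harg : ((n + 1 : Nat) : Int) - 1 = ((n : Nat) : Int) := by push_cast; ring
            have hred : isCorrectGo ((n + 1 : Nat) : Int) (')' :: rest)
                = if ((n + 1 : Nat) : Int) = 0 then false else isCorrectGo (((n + 1 : Nat) : Int) - 1) rest := rfl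
            rw [hred, if_neg hne, harg]
          constructor
          · intro h
            rw [hic] at h
            simp only [List.foldl_cons, hstep]
            exact (ih n).1 h
          · intro h
            rw [hic] at h
            simp only [List.foldl_cons, hstep]
            exact (ih n).2 h
      · have hic : isCorrectGo (k : Int) (c :: rest) = false := by
          simp [isCorrectGo, h1, h2]
        have hstep : checkStep (List.replicate k '(') c = c :: List.replicate k '(' := by
          simp [checkStep, h1, h2]
        constructor
        · intro h; rw [hic] at h; exact absurd h (by simp)
        · intro _
          simp only [List.foldl_cons, hstep]
          exact checkA_stuck rest 0 _ c _ rfl h1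
theorem checkA_eq_isCorrect (s : List Char) : checkA s = isCorrect s := by
  have h := checkA_counter s 0
  simp only [List.replicate_zero] at h
  unfold checkA isCorrect
  cases hic : isCorrectGo 0 s with
  | false =>
    have := h.2 (by simpa using hic)
    simpa [List.isEmpty_iff] using this
  | true =>
    have := h.1 (by simpa using hic)
    simp [this]

-- ===== flip =====
theorem flipGo_eq_flipB (s : List Char) : flipGo s = flipB s := by
  induction s with
  | nil => rfl
  | cons c rest ih => simp [flipGo, flipB, ih]

-- ===== compGo structure =====

-- the comps accumulator is a prefix that only ever grows
theorem compGo_acc (cs : List Char) : ∀ (comps : List (List Char)) (cur : List Char) (depth : Int),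
    compGo comps cur depth cs = comps ++ compGo [] cur depth cs := by
  induction cs with
  | nil => intro comps cur depth; simp [compGo]
  | cons c rest ih =>
    intro comps cur depth
    simp only [compGo]
    by_cases h : (if c = '(' then depth + 1 else if c = ')' then depth - 1 else depth) = 0
    · rw [if_pos h, if_pos h, ih (comps ++ [cur ++ [c]]) [] 0, ih ([] ++ [cur ++ [c]]) [] 0]
      simp
    · rw [if_neg h, if_neg h, ih]

-- compGo cuts exactly where divide cuts
theorem compGo_divide (cs : List Char) : ∀ (num : Int) (d : Nat) (comps : List (List Char)) (cur : List Char),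
    divideGo num 0 cs = some d →
    compGo comps cur num cs = compGo (comps ++ [cur ++ cs.take (d + 1)]) [] 0 (cs.drop (d + 1)) := by
  induction cs with
  | nil => intro num d comps cur h; simp [divideGo] at h
  | cons c rest ih =>
    intro num d comps cur h
    simp only [divideGo] at h
    rw [num_step] at h
    have hdepth : (if c = '(' then num + 1 else if c = ')' then num - 1 else num) = num + chval c := by
      by_cases h1 : c = '(' <;> by_cases h2 : c = ')' <;> simp_all [chval] <;> omega
    by_cases h0 : num + chval c = 0
    · simp only [h0, if_pos rfl] at h
      injection h with h
      subst h
      simp only [compGo, hdepth, h0, if_pos rfl]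
      simp
    · rw [if_neg h0, divideGo_shift] at h
      cases hr : divideGo (num + chval c) 0 rest with
      | none => simp [hr] at h
      | some j =>
        simp [hr] at h
        subst h
        simp only [compGo, hdepth, if_neg h0]
        rw [ih _ _ comps (cur ++ [c]) hr]
        simp [List.take_succ_cons]
        rw [Nat.add_comm 1 j]

-- divide returns an index into its argument
theorem divideGo_lt (cs : List Char) : ∀ (num : Int) (d : Nat), divideGo num 0 cs = some d → d < cs.length := by
  induction cs with
  | nil => intro num d h; simp [divideGo] at h
  | cons c rest ih =>
    intro num d h
    simp only [divideGo] at h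
    by_cases h0 : (if c = '(' then (if c = ')' then num - 1 else num) + 1 else (if c = ')' then num - 1 else num)) = 0
    · simp [h0] at h
      simp only [List.length_cons]
      omega
    · rw [if_neg h0, divideGo_shift] at h
      cases hr : divideGo (if c = '(' then (if c = ')' then num - 1 else num) + 1 else (if c = ')' then num - 1 else num)) 0 rest with
      | none => simp [hr] at h
      | some j =>
        simp [hr] at h
        have := ih _ _ hr
        simp only [List.length_cons]
        omega

-- ===== main equivalence on lists =====

def altList (cs : List Char) : List Char := ((compGo [] [] 0 cs).reverse).foldl accStep []

theorem altList_nil : altList [] = [] := rfl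

theorem altList_cons_comp (u v : List Char) (hd : divideGo 0 0 (u ++ v) = some (u.length - 1))
    (hu : u ≠ []) (hlen : (u ++ v).take ((u.length - 1) + 1) = u ∧ (u ++ v).drop ((u.length - 1) + 1) = v) :
    altList (u ++ v) = accStep (altList v) u := by
  unfold altList
  rw [compGo_divide (u ++ v) 0 _ [] [] hd]
  rw [hlen.1, hlen.2, compGo_acc]
  simp [List.foldl_reverse]

theorem solutionA_eq_altList : ∀ (n : Nat) (cs : List Char), cs.length ≤ n → del cs = 0 →
    solutionA cs = altList cs := by
  intro n
  induction n with
  | zero =>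
    intro cs hlen _
    have : cs = [] := by
      cases cs with
      | nil => rfl
      | cons a b => simp at hlen
    subst this
    rw [altList_nil, solutionA]
    simp
  | succ m ih =>
    intro cs hlen hdel
    by_cases hnil : cs = []
    · subst hnil
      rw [altList_nil, solutionA]; simp
    · obtain ⟨d, hd⟩ := divideGo_total cs 0 hnil (by simpa using hdel)
      have hdelu : del (cs.take (d + 1)) = 0 := by
        have := divideGo_del cs 0 d hd
        omega
      have hsplit : cs.take (d + 1) ++ cs.drop (d + 1) = cs := List.take_append_drop _ _
      have hdelv : del (cs.drop (d + 1)) = 0 := by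
        have := del_append (cs.take (d + 1)) (cs.drop (d + 1))
        rw [hsplit] at this
        omega
      have hvlen : (cs.drop (d + 1)).length ≤ m := by
        have h1 : cs.length ≠ 0 := by simpa [List.length_eq_zero_iff] using hnil
        simp only [List.length_drop]
        omega
      have hihv := ih (cs.drop (d + 1)) hvlen hdelv
      -- u nonempty and its length relates to d
      set u := cs.take (d + 1) with hu
      set v := cs.drop (d + 1) with hv
      have hune : u ≠ [] := by
        rw [hu]
        simp [List.take_eq_nil_iff, hnil]
      have hdlt : d < cs.length := divideGo_lt cs 0 d hd
      have hulen : u.length - 1 + 1 = d + 1 := by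
        rw [hu, List.length_take]
        omega
      have htake : (u ++ v).take (u.length - 1 + 1) = u := by
        rw [hulen, hsplit, hu]
      have hdrop : (u ++ v).drop (u.length - 1 + 1) = v := by
        rw [hulen, hsplit, hv]
      have hdu : divideGo 0 0 (u ++ v) = some (u.length - 1) := by
        rw [hsplit, hd]
        congr 1
        rw [hu, List.length_take]
        omega
      rw [← hsplit]
      rw [altList_cons_comp u v hdu hune ⟨htake, hdrop⟩]
      rw [solutionA]
      simp only [hsplit]
      rw [if_neg hnil, hd]
      simp only [← hu, ← hv]
      rw [accStep, checkA_eq_isCorrect, hihv, flipGo_eq_flipB]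

-- Pre_ in terms of del
theorem del_counts (cs : List Char) : del cs = (cs.count '(' : Int) - (cs.count ')' : Int) := by
  induction cs with
  | nil => rfl
  | cons c rest ih =>
    rw [del_cons, ih]
    by_cases h1 : c = '(' <;> by_cases h2 : c = ')' <;>
      simp_all [List.count_cons, chval] <;> push_cast <;> omega

theorem count_eq_del (cs : List Char) : cs.count '(' = cs.count ')' → del cs = 0 := by
  intro h
  rw [del_counts]
  omega

-- ===== VERDICT (by name: the statement is the Claim_ definition above) =====
theorem solution_spec : Claim_equal_solution := by
  intro p _ hpre
  unfold Spec_solution solution solution_alt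
  unfold Pre_solution at hpre
  have hdel : del p.toList = 0 := count_eq_del _ hpre
  rw [solutionA_eq_altList p.toList.length p.toList le_rfl hdel]
  rfl
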